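-- pv_equiv track=rewrite | github.com/microsoft/AsgardBench | AsgardBench/Model/model_tester.py | num_consecutive_failures
-- ===== SOURCE A (Python) =====
-- from typing import Any, List
--
-- def num_consecutive_failures(step_error_msgs: List[str]) -> int:
--     """
--     Count the number of consecutive failures at the end of the list of step error messages.
--     """
--     count = 0
--     for msg in reversed(step_error_msgs):
--         if msg is not None:
--             count += 1
--         else:
--             break
--     return count
-- ===== SOURCE B (Python) =====
-- def num_consecutive_failures(step_error_msgs):
--     """
--     Count the number of consecutive failures at the end of the list of step error messages.
--     Forward single pass: reset-on-None running counter; no reversal, no break.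
--     """
--     count = 0
--     for msg in step_error_msgs:
--         if msg is not None:
--             count += 1
--         else:
--             count = 0
--     return count
-- ===== Notes on version B (the rewrite author's own statement) =====
-- stated objective: alternative
-- what changed: Replaces the reversed-iteration with early break by a forward full pass maintaining a reset-on-None counter.
import Mathlib
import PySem

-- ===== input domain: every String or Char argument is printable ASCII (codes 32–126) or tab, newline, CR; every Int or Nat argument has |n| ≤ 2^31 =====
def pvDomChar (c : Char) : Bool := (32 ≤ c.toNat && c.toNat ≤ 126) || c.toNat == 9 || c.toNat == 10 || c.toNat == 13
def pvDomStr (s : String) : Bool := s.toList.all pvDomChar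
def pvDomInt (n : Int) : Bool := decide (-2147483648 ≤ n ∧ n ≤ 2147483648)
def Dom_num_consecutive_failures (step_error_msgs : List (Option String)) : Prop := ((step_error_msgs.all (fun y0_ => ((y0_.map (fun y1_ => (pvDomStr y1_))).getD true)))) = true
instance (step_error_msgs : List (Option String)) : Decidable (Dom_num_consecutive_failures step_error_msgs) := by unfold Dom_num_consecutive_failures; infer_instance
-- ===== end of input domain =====

-- B replaces A's reversed iteration with early break by a single forward pass keeping a reset-on-None counter (alternative decomposition, same cost).
-- ===== PORT A =====
-- A: iterate over reversed(step_error_msgs); count += 1 while msg is not None, break at the first None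
def numConsecLoopA (l : List (Option String)) (count : Int) : Int :=
  match l with
  | [] => count
  | msg :: rest => if msg.isSome then numConsecLoopA rest (count + 1) else count

def num_consecutive_failures (step_error_msgs : List (Option String)) : Int :=
  numConsecLoopA step_error_msgs.reverse 0

-- ===== PORT B =====
-- B: forward full pass; counter increments on non-None and resets to 0 on None
def num_consecutive_failures_alt (step_error_msgs : List (Option String)) : Int :=
  step_error_msgs.foldl (fun count msg => if msg.isSome then count + 1 else 0) 0

-- ===== PRECONDITION & SPEC =====
def Spec_num_consecutive_failures (step_error_msgs : List (Option String)) (out : Int) : Prop := out = num_consecutive_failures_alt step_error_msgs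
instance (step_error_msgs : List (Option String)) (out : Int) : Decidable (Spec_num_consecutive_failures step_error_msgs out) := by unfold Spec_num_consecutive_failures; infer_instance

-- ===== CLAIM (what is proved, stated in full; the proofs are below) =====
def Claim_equal_num_consecutive_failures : Prop := ∀ (step_error_msgs : List (Option String)), Dom_num_consecutive_failures step_error_msgs → Spec_num_consecutive_failures step_error_msgs (num_consecutive_failures step_error_msgs)

-- ===== LEMMAS AND PROOFS =====

-- ===== VERDICT (by name: the statement is the Claim_ definition above) =====
theorem loopA_add (l : List (Option String)) (c : Int) :
    numConsecLoopA l c = numConsecLoopA l 0 + c := by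
  induction l generalizing c with
  | nil => simp [numConsecLoopA]
  | cons x rest ih =>
    simp only [numConsecLoopA]
    by_cases h : x.isSome
    · simp [h, ih (c + 1), ih 1]; ring
    · simp [h]

theorem ab_eq (xs : List (Option String)) :
    xs.foldl (fun count msg => if msg.isSome then count + 1 else 0) 0
      = numConsecLoopA xs.reverse 0 := by
  induction xs using List.reverseRecOn with
  | nil => simp [numConsecLoopA]
  | append_singleton xs x ih =>
    rw [List.foldl_append, List.reverse_append]
    simp only [List.foldl_cons, List.foldl_nil, List.reverse_cons, List.reverse_nil, List.nil_append, List.cons_append]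
    by_cases h : x.isSome
    · simp only [numConsecLoopA, h, if_pos, ih]
      rw [loopA_add xs.reverse (0 + 1)]; ring
    · simp [numConsecLoopA, h]

theorem num_consecutive_failures_spec : Claim_equal_num_consecutive_failures := by
  intro xs _
  unfold Spec_num_consecutive_failures num_consecutive_failures num_consecutive_failures_alt
  exact (ab_eq xs).symm
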